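-- pv_equiv track=rewrite | github.com/Hydragon516/GSANet | dataloader/data_for_video.py | get_image_class_dict
-- ===== SOURCE A (Python) =====
-- def get_image_class_dict(images):
--     image_class = {}
--     for image in images:
--         _class = ((image.split('/')[-1]).split('.')[0]).split('_')[0]
--         if _class not in image_class:
--             image_class[_class] = []
--
--         image_class[_class].append(image)
--
--     return image_class
-- ===== SOURCE B (Python) =====
-- def get_image_class_dict(images):
--     # Repeated partition extraction: take the class of the first remaining path,
--     # pull out its whole group in one scan, drop it from the worklist, repeat.
--     result = {}
--     remaining = images
--     while remaining:
--         k = remaining[0].split('/')[-1].split('.')[0].split('_')[0]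
--         result[k] = [im for im in remaining
--                      if im.split('/')[-1].split('.')[0].split('_')[0] == k]
--         remaining = [im for im in remaining
--                      if im.split('/')[-1].split('.')[0].split('_')[0] != k]
--     return result
-- ===== Notes on version B (the rewrite author's own statement) =====
-- stated objective: alternative
-- what changed: A accumulates groups in one pass over the images with a dict membership test per image; B uses no per-image dict accumulation at all: it repeatedly extracts one whole class group at a time by partitioning the remaining worklist (filter equal-key / filter different-key) until the worklist is empty.
import Mathlib
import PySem

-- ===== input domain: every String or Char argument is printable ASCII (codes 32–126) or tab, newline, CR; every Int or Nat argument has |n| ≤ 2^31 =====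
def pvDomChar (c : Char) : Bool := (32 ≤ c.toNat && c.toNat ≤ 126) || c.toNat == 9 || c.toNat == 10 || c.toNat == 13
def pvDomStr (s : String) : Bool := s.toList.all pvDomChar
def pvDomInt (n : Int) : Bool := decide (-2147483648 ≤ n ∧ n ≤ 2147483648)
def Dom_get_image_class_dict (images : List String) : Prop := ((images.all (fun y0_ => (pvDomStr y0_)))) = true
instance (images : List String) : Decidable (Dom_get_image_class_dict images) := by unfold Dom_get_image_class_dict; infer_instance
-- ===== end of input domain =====

-- B replaces A's single hash-accumulation pass by repeated whole-group extraction: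
-- partition the worklist on the first element's class, emit that group, recurse on the rest
-- (objective: alternative algorithm, same return value).

-- shared helper: the class key  image.split('/')[-1].split('.')[0].split('_')[0]
-- (split? never returns none here: the separators are non-empty literals, so .getD [] is exact;
--  pyGetD with default "" is exact: str.split always yields a non-empty list, so the index is in range)
def classKey (image : String) : String :=
  PySem.List.pyGetD ((PySem.Str.split?
    (PySem.List.pyGetD ((PySem.Str.split?
      (PySem.List.pyGetD ((PySem.Str.split? image "/").getD []) (-1) "") ".").getD []) 0 "") "_").getD []) 0 ""

-- ===== PORT A =====
def get_image_class_dict (images : List String) : List (String × List String) :=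
  (images.foldl
    (fun d image =>
      let c := classKey image
      let d := if d.contains c then d else d.insert c ([] : List String)
      d.modify c [] (fun v => v ++ [image]))
    (PySem.Dict.empty)).items

-- ===== PORT B =====
-- the while loop of Source B; 'result[k] = group' always binds a NEW key (every image of class k
-- was just removed from the worklist), so the dict grows by appending (k, group): the result
-- dict is ported as its items list, accumulated in order.
def altLoop (result : List (String × List String)) (remaining : List String) :
    List (String × List String) :=
  match remaining with
  | [] => result
  | image :: tl =>
    let k := classKey image
    let group := (image :: tl).filter (fun im => classKey im == k)
    altLoop (result ++ [(k, group)])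
      ((image :: tl).filter (fun im => !(classKey im == k)))
termination_by remaining.length
decreasing_by
  simp only [List.filter_cons, beq_self_eq_true, Bool.not_true, Bool.false_eq_true,
    if_false, List.length_cons]
  exact Nat.lt_succ_of_le (List.length_filter_le _ _)

def get_image_class_dict_alt (images : List String) : List (String × List String) :=
  altLoop [] images

-- ===== PRECONDITION & SPEC =====
def Spec_get_image_class_dict (images : List String) (out : List (String × List String)) : Prop := out = get_image_class_dict_alt images
instance (images : List String) (out : List (String × List String)) : Decidable (Spec_get_image_class_dict images out) := by unfold Spec_get_image_class_dict; infer_instance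

-- ===== CLAIM (what is proved, stated in full; the proofs are below) =====
def Claim_equal_get_image_class_dict : Prop := ∀ (images : List String), Dom_get_image_class_dict images → Spec_get_image_class_dict images (get_image_class_dict images)

-- ===== LEMMAS AND PROOFS =====

-- the common normal form both ports are reduced to: one pair per distinct class,
-- classes in first-occurrence order, each group the images of that class in input order
def normalForm (images : List String) : List (String × List String) :=
  (PySem.Set.ofList (images.map classKey)).map
    (fun c => (c, images.filter (fun image => classKey image == c)))

-- A's loop body ('if absent insert []; then append') is exactly one modify with default []
lemma stepA_eq_modify (d : PySem.Dict String (List String)) (image : String) :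
    (let c := classKey image
     let d := if d.contains c then d else d.insert c ([] : List String)
     d.modify c [] (fun v => v ++ [image]))
      = d.modify (classKey image) [] (fun v => v ++ [image]) := by
  by_cases h : d.contains (classKey image)
  · simp [h]
  · simp only [h, if_neg, Bool.not_eq_true]
    simp only [PySem.Dict.modify, PySem.Dict.getD_insert_self,
      PySem.Dict.insert_insert_self,
      PySem.Dict.getD_of_not_contains d ([] : List String) (by simpa using h)]

-- the group stored at key c after A's (rewritten) loop: what was there, plus the matching images
lemma getD_foldA (images : List String) (d : PySem.Dict String (List String)) (c : String) :
    (images.foldl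
        (fun d image => d.modify (classKey image) [] (fun v => v ++ [image])) d).getD c []
      = d.getD c [] ++ images.filter (fun image => classKey image == c) := by
  induction images generalizing d with
  | nil => simp
  | cons image rest ih =>
    rw [List.foldl_cons, ih, List.filter_cons]
    by_cases h : classKey image = c
    · simp [h, PySem.Dict.getD_modify_self]
    · have hb : (classKey image == c) = false := by simpa using h
      simp [hb, PySem.Dict.getD_modify_of_ne d ([] : List String) (fun v => v ++ [image]) (Ne.symm h)]

-- A's result is the normal form
lemma A_normal (images : List String) : get_image_class_dict images = normalForm images := by
  unfold get_image_class_dict normalForm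
  rw [PySem.List.foldl_congr_mem images _
      (fun d image => d.modify (classKey image) [] (fun v => v ++ [image]))
      PySem.Dict.empty (fun acc x _ => stepA_eq_modify acc x)]
  set D := images.foldl
      (fun d image => d.modify (classKey image) [] (fun v => v ++ [image]))
      PySem.Dict.empty with hD
  have hk : D.keys = PySem.Set.ofList (images.map classKey) := by
    rw [hD, PySem.Dict.keys_foldl_modify_key images (fun image => classKey image)
      ([] : List String) (fun _ image v => v ++ [image]) PySem.Dict.empty]
    rw [PySem.Dict.keys_empty, PySem.Set.update_nil_left]
  have hnd : D.keys.Nodup := by rw [hk]; exact PySem.Set.nodup_ofList _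
  rw [PySem.Dict.items_eq_map_keys D hnd ([] : List String), hk]
  refine List.map_congr_left (fun c _ => ?_)
  rw [hD, getD_foldA images PySem.Dict.empty c]
  simp [PySem.Dict.getD_empty]

-- set(xs) commutes with filtering
lemma ofList_filter {α : Type} [BEq α] [LawfulBEq α] (p : α → Bool) (xs : List α) :
    PySem.Set.ofList (xs.filter p) = (PySem.Set.ofList xs).filter p := by
  induction xs with
  | nil => rfl
  | cons x xs ih =>
    rw [List.filter_cons, PySem.Set.ofList_cons, List.filter_cons]
    by_cases hx : p x = true
    · simp only [hx, if_true, PySem.Set.ofList_cons, ih,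
        PySem.Set.discard, List.filter_filter]
      rw [List.filter_congr]
      intro a _
      rw [Bool.and_comm]
    · have hx' : p x = false := by simpa using hx
      simp only [hx', Bool.false_eq_true, if_false, ih,
        PySem.Set.discard, List.filter_filter]
      rw [List.filter_congr]
      intro a _
      cases hpa : p a with
      | false => simp
      | true =>
        have : ¬ a = x := fun he => by rw [he, hx'] at hpa; exact Bool.false_ne_true hpa
        simp [beq_eq_false_iff_ne, this]

-- B's while loop produces the accumulated result followed by the normal form of the worklist
set_option maxHeartbeats 1000000 in
lemma altLoop_normal (result : List (String × List String)) (remaining : List String) :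
    altLoop result remaining = result ++ normalForm remaining := by
  fun_induction altLoop result remaining with
  | case1 result => simp [normalForm]
  | case2 result image tl k group ih =>
    rw [ih]
    show result ++ [(classKey image,
          (image :: tl).filter (fun im => classKey im == classKey image))]
        ++ normalForm ((image :: tl).filter (fun im => !(classKey im == classKey image)))
      = result ++ normalForm (image :: tl)
    have hother : (image :: tl).filter (fun im => !(classKey im == classKey image))
        = tl.filter (fun im => !(classKey im == classKey image)) := by
      simp
    unfold normalForm
    rw [hother, List.map_cons, PySem.Set.ofList_cons]
    have h1 : (tl.map classKey).filter (fun y => !(y == classKey image))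
        = (tl.filter (fun im => !(classKey im == classKey image))).map classKey := by
      rw [List.filter_map]
      simp only [Function.comp_def]
    have hspine : PySem.Set.ofList
          ((tl.filter (fun im => !(classKey im == classKey image))).map classKey)
        = PySem.Set.discard (PySem.Set.ofList (tl.map classKey)) (classKey image) := by
      rw [← h1, ofList_filter]
      simp only [PySem.Set.discard]
    rw [hspine]
    rw [List.map_cons]
    rw [List.append_assoc]
    rw [List.singleton_append]
    refine congrArg (fun z => result ++ z) (congrArg₂ List.cons rfl ?_)
    refine List.map_congr_left (fun c hc => ?_)
    have hcne : c ≠ classKey image := ((PySem.Set.mem_discard _ _ _).1 hc).2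
    refine congrArg (fun v => (c, v)) ?_
    have hc0 : (classKey image == c) = false :=
      beq_eq_false_iff_ne.2 (fun h => hcne h.symm)
    have hX : (tl.filter (fun im => !(classKey im == classKey image))).filter
          (fun im => classKey im == c)
        = tl.filter (fun im => classKey im == c) := by
      rw [List.filter_filter]
      refine List.filter_congr (fun a _ => ?_)
      cases hpa : (classKey a == c) with
      | false => rw [Bool.false_and]
      | true =>
        have hac : classKey a = c := by simpa using hpa
        have hak : (classKey a == classKey image) = false :=
          beq_eq_false_iff_ne.2 (fun h => hcne (hac ▸ h))
        rw [hak, Bool.not_false, Bool.true_and]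
    rw [hX, List.filter_cons, hc0]
    rw [if_neg (by exact Bool.false_ne_true)]
-- ===== VERDICT (by name: the statement is the Claim_ definition above) =====
theorem get_image_class_dict_spec : Claim_equal_get_image_class_dict := by
  intro images _
  show _ = _
  rw [A_normal, get_image_class_dict_alt, altLoop_normal, List.nil_append]
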